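-- pv_equiv track=rewrite | github.com/EdgeLake/EdgeLake | edge_lake/generic/utils_sql.py | split_compare_components
-- ===== SOURCE A (Python) =====
-- def split_compare_components(compare_str):
--     left_operand = ""
--     right_operand = ""
--     operation = ""
--
--     step = 0  # changes 0 -> 1 -> 2 to retrieve: left -> operation -> right
--     for index, ch in enumerate(compare_str):
--         if step == 0:
--             # Set Left Operand
--             if ch == ' ':
--                 if left_operand:
--                     step += 1  # Get operation
--                 continue
--             if ch == '=' or ch == '>' or ch == '<':
--                 step += 1
--                 operation = ch
--                 continue
--             left_operand += ch
--             continue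
--         if step == 1:
--             # Set Operation
--             if ch == '=' or ch == '>' or ch == '<':
--                 operation += ch
--                 continue
--             if ch == ' ':
--                 if not operation:
--                     continue
--             right_operand = compare_str[index:].strip()  # take the rest
--             break
--     return [left_operand, operation, right_operand]
-- ===== SOURCE B (Python) =====
-- def split_compare_components(compare_str):
--     # Three sequential scans (skip spaces / take left token / skip spaces / take operator run),
--     # instead of A's char-by-char state machine.
--     n = len(compare_str)
--     i = 0
--     while i < n and compare_str[i] == ' ':
--         i += 1
--     j = i
--     while j < n and compare_str[j] not in ' =<>':
--         j += 1
--     left = compare_str[i:j]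
--     while j < n and compare_str[j] == ' ':
--         j += 1
--     k = j
--     while k < n and compare_str[k] in '=<>':
--         k += 1
--     return [left, compare_str[j:k], compare_str[k:].strip()]
-- ===== Notes on version B (the rewrite author's own statement) =====
-- stated objective: simpler
-- what changed: Replaced the char-by-char state machine (step counter 0/1 with per-character branching, string concatenation and a mid-loop break) by three plain sequential index scans plus slicing: skip spaces, take the left token, skip spaces, take the operator run, strip the rest.
import Mathlib
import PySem

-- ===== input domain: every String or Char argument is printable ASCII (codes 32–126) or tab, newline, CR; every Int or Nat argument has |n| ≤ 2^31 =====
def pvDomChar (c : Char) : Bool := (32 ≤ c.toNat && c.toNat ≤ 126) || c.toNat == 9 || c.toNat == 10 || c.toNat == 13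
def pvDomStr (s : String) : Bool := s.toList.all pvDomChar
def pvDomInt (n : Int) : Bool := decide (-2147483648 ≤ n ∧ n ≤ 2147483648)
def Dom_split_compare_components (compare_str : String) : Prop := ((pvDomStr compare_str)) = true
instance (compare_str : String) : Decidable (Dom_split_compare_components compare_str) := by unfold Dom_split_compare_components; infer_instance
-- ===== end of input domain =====

-- B replaces A's per-character state machine by three sequential scans (simpler decomposition, same O(n) cost).

-- ===== PORT A =====
-- A's for-loop with `step` state and `break`; at the break, `compare_str[index:]` is exactly
-- the unconsumed suffix `c :: cs`, so the slice is that suffix (exact).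
def pvLoopA : List Char → List Char → List Char → Nat → List Char × List Char × List Char
  | [], left, op, _ => (left, op, [])
  | c :: cs, left, op, step =>
    if step = 0 then
      if c = ' ' then
        if left ≠ [] then pvLoopA cs left op 1 else pvLoopA cs left op 0
      else if c = '=' ∨ c = '>' ∨ c = '<' then
        pvLoopA cs left [c] 1
      else
        pvLoopA cs (left ++ [c]) op 0
    else
      if c = '=' ∨ c = '>' ∨ c = '<' then
        pvLoopA cs left (op ++ [c]) 1
      else if c = ' ' ∧ op = [] then
        pvLoopA cs left op 1
      else
        (left, op, PySem.Chars.strip (c :: cs))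

def split_compare_components (compare_str : String) : List String :=
  [String.ofList (pvLoopA compare_str.toList [] [] 0).1,
   String.ofList (pvLoopA compare_str.toList [] [] 0).2.1,
   String.ofList (pvLoopA compare_str.toList [] [] 0).2.2]

-- ===== PORT B =====
-- while i < n and s[i] == ' ': i += 1   (returns the unconsumed suffix)
def pvSkipSp : List Char → List Char
  | [] => []
  | c :: cs => if c = ' ' then pvSkipSp cs else c :: cs

-- while j < n and s[j] not in ' =<>': j += 1   (returns the token and the unconsumed suffix)
def pvTakeTok : List Char → List Char × List Char
  | [] => ([], [])
  | c :: cs =>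
    if c = ' ' ∨ c = '=' ∨ c = '<' ∨ c = '>' then ([], c :: cs)
    else
      let p := pvTakeTok cs
      (c :: p.1, p.2)

-- while k < n and s[k] in '=<>': k += 1   (returns the operator run and the unconsumed suffix)
def pvTakeOp : List Char → List Char × List Char
  | [] => ([], [])
  | c :: cs =>
    if c = '=' ∨ c = '<' ∨ c = '>' then
      let p := pvTakeOp cs
      (c :: p.1, p.2)
    else ([], c :: cs)

def split_compare_components_alt (compare_str : String) : List String :=
  [String.ofList (pvTakeTok (pvSkipSp compare_str.toList)).1,
   String.ofList (pvTakeOp (pvSkipSp (pvTakeTok (pvSkipSp compare_str.toList)).2)).1,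
   String.ofList (PySem.Chars.strip (pvTakeOp (pvSkipSp (pvTakeTok (pvSkipSp compare_str.toList)).2)).2)]

-- ===== PRECONDITION & SPEC =====
def Spec_split_compare_components (compare_str : String) (out : List String) : Prop := out = split_compare_components_alt compare_str
instance (compare_str : String) (out : List String) : Decidable (Spec_split_compare_components compare_str out) := by unfold Spec_split_compare_components; infer_instance

-- ===== CLAIM (what is proved, stated in full; the proofs are below) =====
def Claim_equal_split_compare_components : Prop := ∀ (compare_str : String), Dom_split_compare_components compare_str → Spec_split_compare_components compare_str (split_compare_components compare_str)

-- ===== LEMMAS AND PROOFS =====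

-- step 0 with empty left skips spaces
lemma loopA_skip_sp (cs : List Char) : pvLoopA cs [] [] 0 = pvLoopA (pvSkipSp cs) [] [] 0 := by
  induction cs with
  | nil => rfl
  | cons c cs ih =>
    by_cases h : c = ' '
    · subst h; simpa [pvLoopA, pvSkipSp] using ih
    · simp [pvSkipSp, h]

-- step 1 with nonempty operator consumes the operator run, then strips the rest
lemma loopA_step1_op (cs : List Char) : ∀ left op : List Char, op ≠ [] →
    pvLoopA cs left op 1 = (left, op ++ (pvTakeOp cs).1, PySem.Chars.strip (pvTakeOp cs).2) := by
  induction cs with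
  | nil =>
    intro left op _
    simp [pvLoopA, pvTakeOp, PySem.Chars.strip, PySem.Chars.lstrip, PySem.Chars.rstrip]
  | cons c cs ih =>
    intro left op hop
    by_cases h : c = '=' ∨ c = '<' ∨ c = '>'
    · have h' : c = '=' ∨ c = '>' ∨ c = '<' := by tauto
      rw [show pvLoopA (c :: cs) left op 1 = pvLoopA cs left (op ++ [c]) 1 from by
        simp [pvLoopA, h']]
      rw [ih left (op ++ [c]) (by simp)]
      simp [pvTakeOp, h]
    · have h' : ¬ (c = '=' ∨ c = '>' ∨ c = '<') := by tauto
      have hno : ¬ (c = ' ' ∧ op = []) := by rintro ⟨_, h2⟩; exact hop h2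
      rw [show pvLoopA (c :: cs) left op 1 = (left, op, PySem.Chars.strip (c :: cs)) from by
        simp [pvLoopA, h', hno]]
      simp [pvTakeOp, h]

-- step 1 with empty operator: skip spaces, then either operator run or break
lemma loopA_step1_empty (cs : List Char) : ∀ left : List Char,
    pvLoopA cs left [] 1 =
      (left, (pvTakeOp (pvSkipSp cs)).1, PySem.Chars.strip (pvTakeOp (pvSkipSp cs)).2) := by
  induction cs with
  | nil =>
    intro left
    simp [pvLoopA, pvSkipSp, pvTakeOp, PySem.Chars.strip, PySem.Chars.lstrip, PySem.Chars.rstrip]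
  | cons c cs ih =>
    intro left
    by_cases hsp : c = ' '
    · subst hsp
      rw [show pvLoopA (' ' :: cs) left [] 1 = pvLoopA cs left [] 1 from by simp [pvLoopA]]
      rw [show pvSkipSp (' ' :: cs) = pvSkipSp cs from by simp [pvSkipSp]]
      exact ih left
    · by_cases h : c = '=' ∨ c = '<' ∨ c = '>'
      · have h' : c = '=' ∨ c = '>' ∨ c = '<' := by tauto
        rw [show pvLoopA (c :: cs) left [] 1 = pvLoopA cs left [c] 1 from by simp [pvLoopA, h']]
        rw [loopA_step1_op cs left [c] (by simp)]
        simp [pvSkipSp, pvTakeOp, hsp, h]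
      · have h' : ¬ (c = '=' ∨ c = '>' ∨ c = '<') := by tauto
        simp [pvLoopA, pvSkipSp, pvTakeOp, hsp, h, h']

-- step 0 on a suffix not starting with a space (or with a nonempty accumulator):
-- consume the token, then behave as B's remaining phases
lemma loopA_step0 (cs : List Char) : ∀ acc : List Char,
    (acc = [] → ∀ cs', cs = ' ' :: cs' → False) →
    pvLoopA cs acc [] 0 =
      (acc ++ (pvTakeTok cs).1,
       (pvTakeOp (pvSkipSp (pvTakeTok cs).2)).1,
       PySem.Chars.strip (pvTakeOp (pvSkipSp (pvTakeTok cs).2)).2) := by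
  induction cs with
  | nil =>
    intro acc _
    simp [pvLoopA, pvTakeTok, pvSkipSp, pvTakeOp, PySem.Chars.strip, PySem.Chars.lstrip,
      PySem.Chars.rstrip]
  | cons c cs ih =>
    intro acc hacc
    by_cases hsp : c = ' '
    · subst hsp
      have hne : acc ≠ [] := fun h => hacc h cs rfl
      rw [show pvLoopA (' ' :: cs) acc [] 0 = pvLoopA cs acc [] 1 from by simp [pvLoopA, hne]]
      rw [show pvTakeTok (' ' :: cs) = ([], ' ' :: cs) from by simp [pvTakeTok]]
      rw [loopA_step1_empty cs acc]
      simp [pvSkipSp]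
    · by_cases h : c = '=' ∨ c = '<' ∨ c = '>'
      · have h' : c = '=' ∨ c = '>' ∨ c = '<' := by tauto
        have hd : c = ' ' ∨ c = '=' ∨ c = '<' ∨ c = '>' := by tauto
        rw [show pvLoopA (c :: cs) acc [] 0 = pvLoopA cs acc [c] 1 from by
          simp [pvLoopA, hsp, h']]
        rw [loopA_step1_op cs acc [c] (by simp)]
        simp [pvTakeTok, pvSkipSp, pvTakeOp, hsp, h]
      · have h' : ¬ (c = '=' ∨ c = '>' ∨ c = '<') := by tauto
        have hd : ¬ (c = ' ' ∨ c = '=' ∨ c = '<' ∨ c = '>') := by tauto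
        rw [show pvLoopA (c :: cs) acc [] 0 = pvLoopA cs (acc ++ [c]) [] 0 from by
          simp [pvLoopA, hsp, h']]
        rw [ih (acc ++ [c]) (by simp)]
        simp [pvTakeTok, hd]

lemma skipSp_no_space (cs : List Char) : ∀ cs', pvSkipSp cs = ' ' :: cs' → False := by
  induction cs with
  | nil => intro cs' h; simp [pvSkipSp] at h
  | cons c cs ih =>
    intro cs' h
    by_cases hc : c = ' '
    · subst hc
      rw [show pvSkipSp (' ' :: cs) = pvSkipSp cs from by simp [pvSkipSp]] at h
      exact ih cs' h
    · rw [show pvSkipSp (c :: cs) = c :: cs from by simp [pvSkipSp, hc]] at h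
      exact hc (List.cons.inj h).1

-- ===== VERDICT (by name: the statement is the Claim_ definition above) =====
theorem split_compare_components_spec : Claim_equal_split_compare_components := by
  intro s _
  unfold Spec_split_compare_components split_compare_components split_compare_components_alt
  rw [loopA_skip_sp,
    loopA_step0 (pvSkipSp s.toList) [] (fun _ cs' hc => skipSp_no_space s.toList cs' hc)]
  simp
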